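-- pv_equiv track=rewrite | github.com/tikul/fen-to-png | fen2png.py | isValidCastle
-- ===== SOURCE A (Python) =====
-- def isValidCastle(castle):
--     if len(castle) > 4:
--         return False
--     if castle == "-":
--         return True
--     possible = {i: 0 for i in ["K", "Q", "k", "q"]}
--     for letter in castle:
--         if letter not in possible.keys():
--             return False
--         if possible[letter]:
--             return False
--         possible[letter] = 1
--     return True
-- ===== SOURCE B (Python) =====
-- def isValidCastle(castle):
--     # Recursive decomposition: a castling string is valid iff it is "-" or each
--     # character is one of KQkq and does not reappear later; no explicit length
--     # check is needed (4 distinct letters bound the length automatically).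
--     if castle == "-":
--         return True
--     def rec(s):
--         if not s:
--             return True
--         return s[0] in "KQkq" and s[0] not in s[1:] and rec(s[1:])
--     return rec(castle)
-- ===== Notes on version B (the rewrite author's own statement) =====
-- stated objective: alternative
-- what changed: Replaces A's length guard plus per-character loop over a seen-dict by a structural recursion with no length check and no accumulator: each character must be one of KQkq and must not reappear in the remaining suffix, which bounds the length to 4 automatically.
import Mathlib
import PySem

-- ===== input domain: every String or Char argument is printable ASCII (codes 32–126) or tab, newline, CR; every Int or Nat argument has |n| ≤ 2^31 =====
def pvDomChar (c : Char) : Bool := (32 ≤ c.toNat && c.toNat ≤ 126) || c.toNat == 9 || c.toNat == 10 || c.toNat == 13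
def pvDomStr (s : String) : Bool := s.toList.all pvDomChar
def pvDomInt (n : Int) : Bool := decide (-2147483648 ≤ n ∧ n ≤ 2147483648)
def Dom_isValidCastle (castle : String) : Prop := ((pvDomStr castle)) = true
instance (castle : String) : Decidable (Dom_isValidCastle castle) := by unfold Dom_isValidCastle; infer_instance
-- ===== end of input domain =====

-- B replaces A's length guard + seen-dict loop by a structural recursion with no length
-- check and no accumulator (alternative decomposition; same behaviour on every input).

-- ===== PORT A =====
-- {i: 0 for i in ["K","Q","k","q"]}
def isValidCastleDict0 : PySem.Dict Char Int :=
  ((((PySem.Dict.empty).insert 'K' 0).insert 'Q' 0).insert 'k' 0).insert 'q' 0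

-- the 'for letter in castle' loop, with its early returns
def isValidCastleLoop (possible : PySem.Dict Char Int) : List Char → Bool
  | [] => true
  | letter :: rest =>
    if !(possible.contains letter) then false
    else if possible.getD letter 0 ≠ 0 then false
    else isValidCastleLoop (possible.insert letter 1) rest

def isValidCastle (castle : String) : Bool :=
  if PySem.Str.len castle > 4 then false
  else if castle = "-" then true
  else isValidCastleLoop isValidCastleDict0 castle.toList

-- ===== PORT B =====
-- Source B's rec: s[0] in "KQkq" ("KQkq" written as its character list) and s[0] not in s[1:] and rec(s[1:])
def isValidCastleAltRec : List Char → Bool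
  | [] => true
  | c :: rest =>
    decide (c ∈ (['K', 'Q', 'k', 'q'] : List Char)) && !(rest.contains c) &&
      isValidCastleAltRec rest

def isValidCastle_alt (castle : String) : Bool :=
  if castle = "-" then true
  else isValidCastleAltRec castle.toList

-- ===== PRECONDITION & SPEC =====
def Spec_isValidCastle (castle : String) (out : Bool) : Prop := out = isValidCastle_alt castle
instance (castle : String) (out : Bool) : Decidable (Spec_isValidCastle castle out) := by unfold Spec_isValidCastle; infer_instance

-- ===== CLAIM (what is proved, stated in full; the proofs are below) =====
def Claim_equal_isValidCastle : Prop := ∀ (castle : String), Dom_isValidCastle castle → Spec_isValidCastle castle (isValidCastle castle)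

-- ===== LEMMAS AND PROOFS =====

-- the dict state after marking some letters: four Boolean flags
def markedDict (bK bQ bk bq : Bool) : PySem.Dict Char Int :=
  ⟨[('K', if bK then 1 else 0), ('Q', if bQ then 1 else 0),
    ('k', if bk then 1 else 0), ('q', if bq then 1 else 0)]⟩

lemma dict0_eq : isValidCastleDict0 = markedDict false false false false := by
  decide

-- characterisation of A's loop on a marked dict
lemma loop_char (cs : List Char) : ∀ (bK bQ bk bq : Bool),
    isValidCastleLoop (markedDict bK bQ bk bq) cs =
      (cs.all (fun c => decide (c ∈ (['K', 'Q', 'k', 'q'] : List Char))) &&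
       decide cs.Nodup &&
       (!bK || !cs.contains 'K') && (!bQ || !cs.contains 'Q') &&
       (!bk || !cs.contains 'k') && (!bq || !cs.contains 'q')) := by
  induction cs with
  | nil => intro bK bQ bk bq; simp [isValidCastleLoop]
  | cons c rest ih =>
    intro bK bQ bk bq
    rcases (show c = 'K' ∨ c = 'Q' ∨ c = 'k' ∨ c = 'q' ∨
        (c ≠ 'K' ∧ c ≠ 'Q' ∧ c ≠ 'k' ∧ c ≠ 'q') from by tauto) with
      hK | hQ | hk | hq | hother
    · subst hK
      cases bK with
      | false =>
        have hcon : (markedDict false bQ bk bq).contains 'K' = true := by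
          cases bQ <;> cases bk <;> cases bq <;> decide
        have hgd : (markedDict false bQ bk bq).getD 'K' 0 = 0 := by
          cases bQ <;> cases bk <;> cases bq <;> decide
        have hins : (markedDict false bQ bk bq).insert 'K' 1 = markedDict true bQ bk bq := by
          cases bQ <;> cases bk <;> cases bq <;> decide
        simp only [isValidCastleLoop]
        rw [hcon, hgd, hins, ih]
        by_cases h1 : 'K' ∈ rest <;> by_cases h2 : rest.Nodup <;>
          simp [List.all_cons, List.nodup_cons, h1, h2]
      | true =>
        have hcon : (markedDict true bQ bk bq).contains 'K' = true := by
          cases bQ <;> cases bk <;> cases bq <;> decide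
        have hgd : (markedDict true bQ bk bq).getD 'K' 0 = 1 := by
          cases bQ <;> cases bk <;> cases bq <;> decide
        simp only [isValidCastleLoop]
        rw [hcon, hgd]
        simp
    · subst hQ
      cases bQ with
      | false =>
        have hcon : (markedDict bK false bk bq).contains 'Q' = true := by
          cases bK <;> cases bk <;> cases bq <;> decide
        have hgd : (markedDict bK false bk bq).getD 'Q' 0 = 0 := by
          cases bK <;> cases bk <;> cases bq <;> decide
        have hins : (markedDict bK false bk bq).insert 'Q' 1 = markedDict bK true bk bq := by
          cases bK <;> cases bk <;> cases bq <;> decide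
        simp only [isValidCastleLoop]
        rw [hcon, hgd, hins, ih]
        by_cases h1 : 'Q' ∈ rest <;> by_cases h2 : rest.Nodup <;>
          simp [List.all_cons, List.nodup_cons, h1, h2]
      | true =>
        have hcon : (markedDict bK true bk bq).contains 'Q' = true := by
          cases bK <;> cases bk <;> cases bq <;> decide
        have hgd : (markedDict bK true bk bq).getD 'Q' 0 = 1 := by
          cases bK <;> cases bk <;> cases bq <;> decide
        simp only [isValidCastleLoop]
        rw [hcon, hgd]
        simp
    · subst hk
      cases bk with
      | false =>
        have hcon : (markedDict bK bQ false bq).contains 'k' = true := by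
          cases bK <;> cases bQ <;> cases bq <;> decide
        have hgd : (markedDict bK bQ false bq).getD 'k' 0 = 0 := by
          cases bK <;> cases bQ <;> cases bq <;> decide
        have hins : (markedDict bK bQ false bq).insert 'k' 1 = markedDict bK bQ true bq := by
          cases bK <;> cases bQ <;> cases bq <;> decide
        simp only [isValidCastleLoop]
        rw [hcon, hgd, hins, ih]
        by_cases h1 : 'k' ∈ rest <;> by_cases h2 : rest.Nodup <;>
          simp [List.all_cons, List.nodup_cons, h1, h2]
      | true =>
        have hcon : (markedDict bK bQ true bq).contains 'k' = true := by
          cases bK <;> cases bQ <;> cases bq <;> decide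
        have hgd : (markedDict bK bQ true bq).getD 'k' 0 = 1 := by
          cases bK <;> cases bQ <;> cases bq <;> decide
        simp only [isValidCastleLoop]
        rw [hcon, hgd]
        simp
    · subst hq
      cases bq with
      | false =>
        have hcon : (markedDict bK bQ bk false).contains 'q' = true := by
          cases bK <;> cases bQ <;> cases bk <;> decide
        have hgd : (markedDict bK bQ bk false).getD 'q' 0 = 0 := by
          cases bK <;> cases bQ <;> cases bk <;> decide
        have hins : (markedDict bK bQ bk false).insert 'q' 1 = markedDict bK bQ bk true := by
          cases bK <;> cases bQ <;> cases bk <;> decide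
        simp only [isValidCastleLoop]
        rw [hcon, hgd, hins, ih]
        by_cases h1 : 'q' ∈ rest <;> by_cases h2 : rest.Nodup <;>
          simp [List.all_cons, List.nodup_cons, h1, h2]
      | true =>
        have hcon : (markedDict bK bQ bk true).contains 'q' = true := by
          cases bK <;> cases bQ <;> cases bk <;> decide
        have hgd : (markedDict bK bQ bk true).getD 'q' 0 = 1 := by
          cases bK <;> cases bQ <;> cases bk <;> decide
        simp only [isValidCastleLoop]
        rw [hcon, hgd]
        simp
    · obtain ⟨hK, hQ, hk, hq⟩ := hother
      have hcon : (markedDict bK bQ bk bq).contains c = false := by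
        simp [markedDict, PySem.Dict.contains_mk, Ne.symm hK, Ne.symm hQ, Ne.symm hk, Ne.symm hq]
      simp only [isValidCastleLoop]
      rw [hcon]
      simp [List.all_cons, hK, hQ, hk, hq]

-- characterisation of B's recursion
lemma altRec_char (cs : List Char) :
    isValidCastleAltRec cs =
      (cs.all (fun c => decide (c ∈ (['K', 'Q', 'k', 'q'] : List Char))) &&
       decide cs.Nodup) := by
  induction cs with
  | nil => simp [isValidCastleAltRec]
  | cons c rest ih =>
    simp only [isValidCastleAltRec, ih, List.all_cons, List.nodup_cons]
    by_cases h1 : c ∈ rest <;> by_cases h2 : rest.Nodup <;> simp [h1, h2]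

-- distinct letters drawn from the four castling letters bound the length by 4
lemma len_le_four (cs : List Char)
    (hall : cs.all (fun c => decide (c ∈ (['K', 'Q', 'k', 'q'] : List Char))) = true)
    (hnd : cs.Nodup) : cs.length ≤ 4 := by
  have hsub : cs.toFinset ⊆ (['K', 'Q', 'k', 'q'] : List Char).toFinset := by
    intro x hx
    simp only [List.mem_toFinset] at hx ⊢
    have := (List.all_eq_true.mp hall) x hx
    simpa using this
  have h1 : cs.toFinset.card = cs.length := List.toFinset_card_of_nodup hnd
  have h2 := Finset.card_le_card hsub
  have h3 : (['K', 'Q', 'k', 'q'] : List Char).toFinset.card = 4 := by decide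
  omega

-- ===== VERDICT (by name: the statement is the Claim_ definition above) =====
theorem isValidCastle_spec : Claim_equal_isValidCastle := by
  intro castle _
  unfold Spec_isValidCastle isValidCastle isValidCastle_alt
  by_cases hd : castle = "-"
  · subst hd; decide
  · rw [if_neg hd, altRec_char]
    by_cases hlen : PySem.Str.len castle > 4
    · rw [if_pos hlen]
      have hlen' : ¬ (castle.toList.length ≤ 4) := by
        simp only [PySem.Str.len_eq] at hlen; omega
      by_cases hall : castle.toList.all
          (fun c => decide (c ∈ (['K', 'Q', 'k', 'q'] : List Char))) = true
      · by_cases hnd : castle.toList.Nodup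
        · exact absurd (len_le_four _ hall hnd) hlen'
        · simp [hnd, hd]
      · simp [hd]
        intro h
        exact absurd (List.all_eq_true.mpr (by intro x hx; simpa using h x hx)) hall
    · rw [if_neg hlen, if_neg hd, dict0_eq, loop_char]
      simp
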